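-- pv_equiv track=rewrite | github.com/djb258/barton-outreach-core | ctb/sys/enrichment/pipeline_engine/utils/verification.py | is_role_based_email
-- ===== SOURCE A (Python) =====
-- ROLE_BASED_PREFIXES = {
--     'info', 'admin', 'support', 'sales', 'help', 'contact', 'office',
--     'service', 'webmaster', 'postmaster', 'hostmaster', 'abuse',
--     'noreply', 'no-reply', 'mailer-daemon', 'marketing', 'billing',
--     'feedback', 'team', 'hr', 'careers', 'jobs', 'press', 'media',
--     'legal', 'compliance', 'privacy', 'security', 'accounting',
--     'newsletter', 'subscribe', 'unsubscribe', 'orders', 'invoice'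
-- }
--
-- def is_role_based_email(email: str) -> bool:
--     """
--     Check if email is role-based (not personal).
--
--     Role-based: info@, support@, admin@, sales@, etc.
--
--     Args:
--         email: Email to check
--
--     Returns:
--         True if role-based
--     """
--     if not email or '@' not in email:
--         return False
--
--     local_part = email.split('@')[0].lower()
--
--     # Check against known prefixes
--     if local_part in ROLE_BASED_PREFIXES:
--         return True
--
--     # Check for common patterns
--     for prefix in ROLE_BASED_PREFIXES:
--         if local_part.startswith(prefix + '.') or local_part.startswith(prefix + '_'):
--             return True
--
--     return False
-- ===== SOURCE B (Python) =====
-- ROLE_BASED_PREFIXES = {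
--     'info', 'admin', 'support', 'sales', 'help', 'contact', 'office',
--     'service', 'webmaster', 'postmaster', 'hostmaster', 'abuse',
--     'noreply', 'no-reply', 'mailer-daemon', 'marketing', 'billing',
--     'feedback', 'team', 'hr', 'careers', 'jobs', 'press', 'media',
--     'legal', 'compliance', 'privacy', 'security', 'accounting',
--     'newsletter', 'subscribe', 'unsubscribe', 'orders', 'invoice'
-- }
--
--
-- def is_role_based_email(email: str) -> bool:
--     if '@' not in email:
--         return False
--     # Single pass over the characters: collect the lowercased head of the
--     # local part, stopping at the first '@', '.' or '_'.  A role prefix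
--     # matches iff it equals exactly that head, so one set lookup suffices.
--     candidate = []
--     for ch in email:
--         if ch in '@._':
--             break
--         candidate.append(ch.lower())
--     return ''.join(candidate) in ROLE_BASED_PREFIXES
-- ===== Notes on version B (the rewrite author's own statement) =====
-- stated objective: simpler
-- what changed: A tests the whole local part for set membership and then scans all 34 role prefixes with startswith; B makes one left-to-right pass over the characters, collecting the lowercased head up to the first '@', '.' or '_', and does a single set lookup of that head (no split, no prefix loop).
import Mathlib
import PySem

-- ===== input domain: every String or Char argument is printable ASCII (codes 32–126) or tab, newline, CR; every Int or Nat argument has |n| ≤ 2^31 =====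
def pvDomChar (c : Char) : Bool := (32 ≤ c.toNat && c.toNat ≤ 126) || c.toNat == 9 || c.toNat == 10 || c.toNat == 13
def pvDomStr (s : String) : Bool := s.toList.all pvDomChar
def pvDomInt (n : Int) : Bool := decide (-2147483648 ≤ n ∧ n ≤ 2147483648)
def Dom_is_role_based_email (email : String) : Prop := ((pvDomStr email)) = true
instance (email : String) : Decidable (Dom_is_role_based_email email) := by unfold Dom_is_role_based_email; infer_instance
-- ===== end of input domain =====

-- B replaces A's whole-string set test plus per-prefix startswith scan by one left-to-right
-- character pass that cuts the lowered local part at the first '@'/'.'/'_' and does a single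
-- set lookup of that head (objective: simpler).


-- ===== PORT A =====
-- ROLE_BASED_PREFIXES (a Python set of strings; elements as char lists); shared module constant
def rolePrefixes : PySem.Set (List Char) :=
  PySem.Set.ofList (["info", "admin", "support", "sales", "help", "contact", "office",
    "service", "webmaster", "postmaster", "hostmaster", "abuse",
    "noreply", "no-reply", "mailer-daemon", "marketing", "billing",
    "feedback", "team", "hr", "careers", "jobs", "press", "media",
    "legal", "compliance", "privacy", "security", "accounting",
    "newsletter", "subscribe", "unsubscribe", "orders", "invoice"].map String.toList)

def is_role_based_email (email : String) : Bool :=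
  if email = "" || !(PySem.Str.isIn "@" email) then false
  else
    let local_part := PySem.Chars.lower ((PySem.Chars.splitOn email.toList ['@']).headD [])
    if rolePrefixes.contains local_part then true
    else rolePrefixes.any (fun p =>
      PySem.Chars.startswith local_part (p ++ ['.']) ||
      PySem.Chars.startswith local_part (p ++ ['_']))

-- ===== PORT B =====
-- the for/break loop of Source B: walk the characters, lowering each, stop at '@', '.' or '_'
def scanLocal : List Char → List Char
  | [] => []
  | c :: t => if c = '@' || c = '.' || c = '_' then [] else PySem.Chars.lowerChar c :: scanLocal t

def is_role_based_email_alt (email : String) : Bool :=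
  if !(PySem.Str.isIn "@" email) then false
  else rolePrefixes.contains (scanLocal email.toList)

-- ===== PRECONDITION & SPEC =====
def Spec_is_role_based_email (email : String) (out : Bool) : Prop := out = is_role_based_email_alt email
instance (email : String) (out : Bool) : Decidable (Spec_is_role_based_email email out) := by unfold Spec_is_role_based_email; infer_instance

-- ===== CLAIM (what is proved, stated in full; the proofs are below) =====
def Claim_equal_is_role_based_email : Prop := ∀ (email : String), Dom_is_role_based_email email → Spec_is_role_based_email email (is_role_based_email email)

-- ===== LEMMAS AND PROOFS =====

-- once a split has been recorded, the head of splitOn.go's final result is fixed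
lemma go_acc_headD (sep : List Char) (d : List Char) :
    ∀ (fuel : Nat) (l cur : List Char) (acc : List (List Char)) (x : List Char),
      (PySem.Chars.splitOn.go sep fuel l cur (acc ++ [x])).headD d = x := by
  intro fuel
  induction fuel with
  | zero =>
    intro l cur acc x
    simp [PySem.Chars.splitOn.go]
  | succ n ih =>
    intro l cur acc x
    cases l with
    | nil => simp [PySem.Chars.splitOn.go]
    | cons c rest =>
      rw [PySem.Chars.splitOn.go]
      by_cases h : sep.isPrefixOf (c :: rest) = true
      · rw [if_pos h]
        have := ih (List.drop sep.length (c :: rest)) [] ((cur.reverse :: acc)) x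
        simpa using this
      · rw [if_neg h]
        exact ih rest (c :: cur) acc x

-- the first chunk of splitOn.go at '@' is what takeWhile (· ≠ '@') collects
lemma go_headD :
    ∀ (fuel : Nat) (l cur : List Char), l.length ≤ fuel →
      (PySem.Chars.splitOn.go ['@'] fuel l cur []).headD []
        = cur.reverse ++ l.takeWhile (fun c => c != '@') := by
  intro fuel
  induction fuel with
  | zero =>
    intro l cur h
    have : l = [] := List.eq_nil_of_length_eq_zero (Nat.le_zero.mp h)
    subst this
    simp [PySem.Chars.splitOn.go]
  | succ n ih =>
    intro l cur h
    cases l with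
    | nil => simp [PySem.Chars.splitOn.go]
    | cons c rest =>
      rw [PySem.Chars.splitOn.go]
      by_cases hc : c = '@'
      · subst hc
        have hpre : (['@'] : List Char).isPrefixOf ('@' :: rest) = true := by simp
        rw [if_pos hpre]
        have := go_acc_headD ['@'] [] n (List.drop (['@'] : List Char).length ('@' :: rest)) [] [] cur.reverse
        simpa using this
      · have hpre : ¬ (['@'] : List Char).isPrefixOf (c :: rest) = true := by
          simp [List.isPrefixOf, Ne.symm hc]
        rw [if_neg hpre]
        have hlen : rest.length ≤ n := by simpa using Nat.succ_le_succ_iff.mp (by simpa using h)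
        rw [ih rest (c :: cur) hlen]
        rw [List.takeWhile_cons_of_pos (by simp [hc])]
        simp

-- head of splitOn on single-char separator '@'
lemma headD_splitOn (L : List Char) :
    (PySem.Chars.splitOn L ['@']).headD [] = L.takeWhile (fun c => c != '@') := by
  rw [PySem.Chars.splitOn]
  exact go_headD (L.length + 1) L [] (by omega)

-- lowering never turns a character into '.' or '_'
lemma toNat_ofNat_lt (n : Nat) (h : n < 0xD800) : (Char.ofNat n).toNat = n := by
  have hv : Nat.isValidChar n := Or.inl h
  rw [Char.ofNat, dif_pos hv]
  simp [Char.ofNatAux, Char.toNat]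

lemma lowerChar_sep (c : Char) (h1 : c ≠ '.') (h2 : c ≠ '_') :
    PySem.Chars.lowerChar c ≠ '.' ∧ PySem.Chars.lowerChar c ≠ '_' := by
  unfold PySem.Chars.lowerChar PySem.Chars.isupper
  by_cases hu : ('A' ≤ c ∧ c ≤ 'Z')
  · rw [if_pos (by simp [hu.1, hu.2])]
    have h65 : 65 ≤ c.toNat := hu.1
    have h90 : c.toNat ≤ 90 := hu.2
    constructor
    · intro hEq
      have h46 : (Char.ofNat (c.toNat + 32)).toNat = ('.' : Char).toNat := by rw [hEq]
      rw [toNat_ofNat_lt _ (by omega)] at h46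
      have : ('.' : Char).toNat = 46 := by decide
      omega
    · intro hEq
      have h95 : (Char.ofNat (c.toNat + 32)).toNat = ('_' : Char).toNat := by rw [hEq]
      rw [toNat_ofNat_lt _ (by omega)] at h95
      have : ('_' : Char).toNat = 95 := by decide
      omega
  · have : ¬(decide ('A' ≤ c) && decide (c ≤ 'Z')) = true := by
      intro hb
      exact hu ⟨by simpa using (Bool.and_eq_true_iff.mp hb).1, by simpa using (Bool.and_eq_true_iff.mp hb).2⟩
    rw [if_neg this]
    exact ⟨h1, h2⟩

-- B's single pass equals A's lower-then-cut pipeline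
lemma scan_eq (L : List Char) :
    scanLocal L
      = (PySem.Chars.lower (L.takeWhile (fun c => c != '@'))).takeWhile
          (fun c => !(c == '.' || c == '_')) := by
  induction L with
  | nil => simp [scanLocal, PySem.Chars.lower]
  | cons c t ih =>
    by_cases h1 : c = '@'
    · subst h1
      simp [scanLocal, PySem.Chars.lower]
    · by_cases h2 : c = '.'
      · subst h2
        rw [scanLocal]
        rw [List.takeWhile_cons_of_pos (by simp)]
        have : PySem.Chars.lowerChar '.' = '.' := by decide
        simp [PySem.Chars.lower, this]
      · by_cases h3 : c = '_'
        · subst h3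
          rw [scanLocal]
          rw [List.takeWhile_cons_of_pos (by simp)]
          have : PySem.Chars.lowerChar '_' = '_' := by decide
          simp [PySem.Chars.lower, this]
        · rw [scanLocal, if_neg (by simp [h1, h2, h3])]
          rw [List.takeWhile_cons_of_pos (by simp [h1])]
          obtain ⟨hd, hu⟩ := lowerChar_sep c h2 h3
          simp only [PySem.Chars.lower, List.map_cons]
          rw [List.takeWhile_cons_of_pos (by simp [hd, hu])]
          simp only [PySem.Chars.lower] at ih
          rw [ih]

-- A prefix p without separators equals the cut-at-first-separator of L iff L is p itself
-- or p followed by a separator.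
lemma takeWhile_sep_eq_iff (p L : List Char)
    (hp : ∀ c ∈ p, (c == '.' || c == '_') = false) :
    (L.takeWhile (fun c => !(c == '.' || c == '_')) = p)
      ↔ (L = p ∨ (p ++ ['.']) <+: L ∨ (p ++ ['_']) <+: L) := by
  induction p generalizing L with
  | nil =>
    cases L with
    | nil => simp
    | cons c t =>
      by_cases h1 : c = '.'
      · rw [List.takeWhile_cons_of_neg (by simp [h1])]
        simp [h1]
      · by_cases h2 : c = '_'
        · rw [List.takeWhile_cons_of_neg (by simp [h2])]
          simp [h2]
        · rw [List.takeWhile_cons_of_pos (by simp [h1, h2])]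
          simp [List.cons_prefix_cons, Ne.symm h1, Ne.symm h2]
  | cons a p' ih =>
    have ha : (a == '.' || a == '_') = false := hp a (by simp)
    have hp' : ∀ c ∈ p', (c == '.' || c == '_') = false := fun c hc => hp c (by simp [hc])
    cases L with
    | nil => simp
    | cons c t =>
      by_cases hca : c = a
      · subst hca
        rw [List.takeWhile_cons_of_pos (by simp [ha])]
        simp only [List.cons_append, List.cons_prefix_cons, List.cons.injEq, true_and]
        rw [ih t hp']
      · constructor
        · intro h
          exfalso
          by_cases hq : (c == '.' || c == '_') = true
          · rw [List.takeWhile_cons_of_neg (by simp [hq])] at h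
            simp at h
          · rw [List.takeWhile_cons_of_pos (by simp [hq])] at h
            exact hca (List.cons.inj h).1
        · intro h
          exfalso
          rcases h with h | h | h
          · exact hca (List.cons.inj h).1
          · rw [List.cons_append] at h
            exact hca ((List.cons_prefix_cons.mp h).1).symm
          · rw [List.cons_append] at h
            exact hca ((List.cons_prefix_cons.mp h).1).symm

lemma sep_free_bool : rolePrefixes.all (fun p => p.all (fun c => !(c == '.' || c == '_'))) = true := by rfl

lemma sep_free : ∀ p ∈ rolePrefixes, ∀ c ∈ p, (c == '.' || c == '_') = false := by
  have h := sep_free_bool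
  rw [List.all_eq_true] at h
  intro p hp c hc
  have hpall := h p hp
  rw [List.all_eq_true] at hpall
  simpa using hpall c hc

lemma contains_iff_exists (s : PySem.Set (List Char)) (x : List Char) :
    s.contains x = true ↔ ∃ p ∈ s, x = p := by
  simp only [PySem.Set.contains, List.contains_iff_exists_mem_beq, beq_iff_eq]

-- A's membership-plus-startswith body equals one lookup of the cut local part
lemma key_iff (L : List Char) :
    (if rolePrefixes.contains L = true then true
     else rolePrefixes.any (fun p =>
       PySem.Chars.startswith L (p ++ ['.']) || PySem.Chars.startswith L (p ++ ['_'])))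
    = rolePrefixes.contains (L.takeWhile (fun c => !(c == '.' || c == '_'))) := by
  rw [Bool.eq_iff_iff]
  conv_rhs => rw [contains_iff_exists]
  constructor
  · intro h
    by_cases hm : rolePrefixes.contains L = true
    · obtain ⟨p, hpmem, hpe⟩ := (contains_iff_exists _ _).mp hm
      exact ⟨p, hpmem, (takeWhile_sep_eq_iff p L (sep_free p hpmem)).mpr (Or.inl hpe)⟩
    · rw [if_neg hm, List.any_eq_true] at h
      obtain ⟨p, hpmem, hps⟩ := h
      rw [Bool.or_eq_true_iff] at hps
      refine ⟨p, hpmem, (takeWhile_sep_eq_iff p L (sep_free p hpmem)).mpr ?_⟩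
      rcases hps with hps | hps
      · exact Or.inr (Or.inl ((PySem.Chars.startswith_iff _ _).mp hps))
      · exact Or.inr (Or.inr ((PySem.Chars.startswith_iff _ _).mp hps))
  · intro h
    obtain ⟨p, hpmem, hpb⟩ := h
    rcases (takeWhile_sep_eq_iff p L (sep_free p hpmem)).mp hpb with hLp | hpre | hpre
    · rw [if_pos ((contains_iff_exists _ _).mpr ⟨p, hpmem, hLp⟩)]
    · by_cases hm : rolePrefixes.contains L = true
      · rw [if_pos hm]
      · rw [if_neg hm, List.any_eq_true]
        exact ⟨p, hpmem, Bool.or_eq_true_iff.mpr (Or.inl ((PySem.Chars.startswith_iff _ _).mpr hpre))⟩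
    · by_cases hm : rolePrefixes.contains L = true
      · rw [if_pos hm]
      · rw [if_neg hm, List.any_eq_true]
        exact ⟨p, hpmem, Bool.or_eq_true_iff.mpr (Or.inr ((PySem.Chars.startswith_iff _ _).mpr hpre))⟩

-- ===== VERDICT (by name: the statement is the Claim_ definition above) =====
theorem is_role_based_email_spec : Claim_equal_is_role_based_email := by
  intro email _
  unfold Spec_is_role_based_email is_role_based_email is_role_based_email_alt
  by_cases hin : PySem.Str.isIn "@" email = true
  · have hne : email ≠ "" := by
      intro h
      subst h
      have := (PySem.Str.isIn_iff_infix "@" "").mp hin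
      simp at this
    rw [hin]
    simp only [Bool.not_true, Bool.or_false]
    rw [if_neg (by simpa using hne), if_neg (show ¬ (false = true) by simp)]
    rw [key_iff, headD_splitOn, ← scan_eq]
  · have hf : PySem.Str.isIn "@" email = false := Bool.eq_false_iff.mpr hin
    rw [hf]
    simp
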